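-- pv_equiv track=rewrite | github.com/pulakshk/book-research-tool | execution/enrich_april_ku_titles.py | _pick_email
-- ===== SOURCE A (Python) =====
-- _BAD_EMAILS = {"user@domain.com", "email@example.com", "author@directauthor.com"}
--
-- _BAD_DOMAINS = {"example.com", "domain.com", "email.com", "test.com", "sentry.io"}
--
-- def _valid_email(e):
--     e = e.strip().lower()
--     if not e or "@" not in e or e in _BAD_EMAILS:
--         return False
--     return e.split("@")[-1] not in _BAD_DOMAINS
--
-- def _pick_email(emails, author=""):
--     valid = [e for e in emails if _valid_email(e)]
--     if not valid:
--         return ""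
--     parts = [p.lower() for p in author.split() if len(p) > 2]
--     for e in valid:
--         local = e.split("@")[0].lower().replace(".", "").replace("_", "")
--         if any(p in local for p in parts):
--             return e
--     return valid[0]
-- ===== SOURCE B (Python) =====
-- _BAD_EMAILS = {"user@domain.com", "email@example.com", "author@directauthor.com"}
--
-- _BAD_DOMAINS = {"example.com", "domain.com", "email.com", "test.com", "sentry.io"}
--
-- def _valid_email(e):
--     e = e.strip().lower()
--     if not e or "@" not in e or e in _BAD_EMAILS:
--         return False
--     return e.split("@")[-1] not in _BAD_DOMAINS
--
-- def _pick_email(emails, author=""):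
--     parts = [p.lower() for p in author.split() if len(p) > 2]
--     best = ""
--     have_match = False
--     for e in reversed(emails):
--         if _valid_email(e):
--             local = e.split("@")[0].lower().replace(".", "").replace("_", "")
--             if any(p in local for p in parts):
--                 best = e
--                 have_match = True
--             elif not have_match:
--                 best = e
--     return best
-- ===== Notes on version B (the rewrite author's own statement) =====
-- stated objective: alternative
-- what changed: B traverses the emails back-to-front with a single fold (best, have_match) and no early return or intermediate list: earlier matches override later ones, so the first author-matching valid email (or else the first valid email, or else "") falls out of the reverse pass; A builds a filtered list, scans it forward with early return and indexes valid[0] as fallback.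
import Mathlib
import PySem

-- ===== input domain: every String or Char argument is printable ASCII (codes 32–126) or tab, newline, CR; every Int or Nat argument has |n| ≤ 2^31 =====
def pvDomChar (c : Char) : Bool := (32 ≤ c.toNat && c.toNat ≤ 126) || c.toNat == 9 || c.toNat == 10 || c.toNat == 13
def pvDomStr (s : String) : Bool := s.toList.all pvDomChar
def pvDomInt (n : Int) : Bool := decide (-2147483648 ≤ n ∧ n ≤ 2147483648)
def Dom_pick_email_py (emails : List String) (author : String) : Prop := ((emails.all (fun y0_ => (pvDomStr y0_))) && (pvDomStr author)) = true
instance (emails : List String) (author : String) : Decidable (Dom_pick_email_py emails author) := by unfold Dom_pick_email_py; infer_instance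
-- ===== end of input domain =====

-- B replaces A's filter-then-forward-scan (early return, valid[0] fallback) by a single
-- backward fold over the raw emails with a (best, have_match) state and no early return
-- (objective: alternative).


-- ===== PORT A =====
-- shared module context: _BAD_EMAILS / _BAD_DOMAINS (Python sets used only for membership) and _valid_email
def pvBadEmails : List String := ["user@domain.com", "email@example.com", "author@directauthor.com"]

def pvBadDomains : List String := ["example.com", "domain.com", "email.com", "test.com", "sentry.io"]

def valid_email (e : String) : Bool :=
  let e := PySem.Str.lower (PySem.Str.strip e)
  if e = "" || !PySem.Str.isIn "@" e || pvBadEmails.contains e then false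
  else !pvBadDomains.contains (PySem.List.pyGetD ((PySem.Str.split? e "@").getD []) (-1) "")

-- local = e.split("@")[0].lower().replace(".", "").replace("_", "")  (used by both Pythons' match test)
def pvLocal (e : String) : String :=
  PySem.Str.replace (PySem.Str.replace (PySem.Str.lower (PySem.List.pyGetD ((PySem.Str.split? e "@").getD []) 0 "")) "." "") "_" ""

-- the author-match test 'any(p in local for p in parts)'
def pvMatch (parts : List String) (e : String) : Bool :=
  parts.any (fun p => PySem.Str.isIn p (pvLocal e))

-- A's 'for e in valid: … return e; return valid[0]' loop (fallback = valid[0])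
def pickScanA (parts : List String) (fallback : String) : List String → String
  | [] => fallback
  | e :: rest =>
    if pvMatch parts e then e
    else pickScanA parts fallback rest

def pick_email_py (emails : List String) (author : String) : String :=
  let valid := emails.filter valid_email
  if valid = [] then ""
  else
    let parts := ((PySem.Str.split₀ author).filter (fun p => PySem.Str.len p > 2)).map PySem.Str.lower
    pickScanA parts (PySem.List.pyGetD valid 0 "") valid

-- ===== PORT B =====
-- one step of B's 'for e in reversed(emails)' loop over the state (best, have_match)
def pickStepB (parts : List String) (acc : String × Bool) (e : String) : String × Bool :=
  if valid_email e then
    if pvMatch parts e then (e, true)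
    else if !acc.2 then (e, acc.2)
    else acc
  else acc

def pick_email_py_alt (emails : List String) (author : String) : String :=
  let parts := ((PySem.Str.split₀ author).filter (fun p => PySem.Str.len p > 2)).map PySem.Str.lower
  (emails.reverse.foldl (pickStepB parts) ("", false)).1

-- ===== PRECONDITION & SPEC =====
def Spec_pick_email_py (emails : List String) (author : String) (out : String) : Prop := out = pick_email_py_alt emails author
instance (emails : List String) (author : String) (out : String) : Decidable (Spec_pick_email_py emails author out) := by unfold Spec_pick_email_py; infer_instance

-- ===== CLAIM (what is proved, stated in full; the proofs are below) =====
def Claim_equal_pick_email_py : Prop := ∀ (emails : List String) (author : String), Dom_pick_email_py emails author → Spec_pick_email_py emails author (pick_email_py emails author)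

-- ===== LEMMAS AND PROOFS =====
-- the common functional characterization of both programs:
-- first valid-and-matching email, else first valid email, else ""
def pickF (parts : List String) (l : List String) : String :=
  match l.find? (fun e => valid_email e && pvMatch parts e) with
  | some x => x
  | none => (l.find? valid_email).getD ""

-- B's backward fold computes (pickF, "some valid email matches")
theorem foldB_eq (parts : List String) (l : List String) :
    l.reverse.foldl (pickStepB parts) ("", false) =
      (pickF parts l, l.any (fun e => valid_email e && pvMatch parts e)) := by
  rw [List.foldl_reverse]
  induction l with
  | nil => simp [pickF]
  | cons e rest ih =>
    simp only [List.foldr_cons, ih, List.find?_cons, List.any_cons]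
    by_cases hv : valid_email e
    · by_cases hm : pvMatch parts e
      · simp [pickStepB, pickF, hv, hm]
      · by_cases ha : rest.any (fun e => valid_email e && pvMatch parts e)
        · obtain ⟨x, hx, hc⟩ := List.any_eq_true.mp ha
          rcases hfind : rest.find? (fun e => valid_email e && pvMatch parts e) with _ | y
          · exact absurd (List.find?_eq_none.mp hfind x hx) (by simp [hc])
          · simp [pickStepB, pickF, hv, hm, ha, List.find?_cons, hfind]
        · have hf : rest.find? (fun e => valid_email e && pvMatch parts e) = none := by
            rw [List.find?_eq_none]
            intro x hx hc
            exact ha (List.any_eq_true.mpr ⟨x, hx, hc⟩)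
          simp [pickStepB, pickF, hv, hm, ha, List.find?_cons, hf]
    · simp [pickStepB, pickF, hv]

-- A's scan over the filtered list is pickF with the given fallback
theorem scanA_eq (parts : List String) (fb : String) (l : List String) :
    pickScanA parts fb (l.filter valid_email) =
      match l.find? (fun e => valid_email e && pvMatch parts e) with
      | some x => x
      | none => fb := by
  induction l with
  | nil => simp [pickScanA]
  | cons e rest ih =>
    by_cases hv : valid_email e
    · by_cases hm : pvMatch parts e
      · simp [List.filter_cons, pickScanA, hv, hm, List.find?_cons]
      · simp [List.filter_cons, pickScanA, hv, hm, List.find?_cons, ih]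
    · simp [List.filter_cons, hv, List.find?_cons, ih]

-- first element of the filtered list = first element satisfying the predicate
theorem head_filter_eq_find? (l : List String) (h : l.filter valid_email ≠ []) :
    PySem.List.pyGetD (l.filter valid_email) 0 "" = (l.find? valid_email).getD "" := by
  induction l with
  | nil => simp at h
  | cons e rest ih =>
    by_cases hv : valid_email e
    · simp [List.filter_cons, hv, List.find?_cons, PySem.List.pyGetD, PySem.List.pyGet?, PySem.List.pyIdx?]
    · simp only [List.filter_cons, hv, Bool.false_eq_true, if_false, List.find?_cons]
      exact ih (by simpa [List.filter_cons, hv] using h)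

-- ===== VERDICT (by name: the statement is the Claim_ definition above) =====
theorem pick_email_py_spec : Claim_equal_pick_email_py := by
  intro emails author _
  unfold Spec_pick_email_py
  simp only [pick_email_py, pick_email_py_alt, foldB_eq]
  set parts := ((PySem.Str.split₀ author).filter (fun p => PySem.Str.len p > 2)).map PySem.Str.lower with hp
  by_cases hnil : emails.filter valid_email = []
  · have hfv : emails.find? valid_email = none := by
      rw [List.find?_eq_none]
      intro x hx hvx
      exact absurd (List.mem_filter.mpr ⟨hx, hvx⟩) (by simp [hnil])
    have hfm : emails.find? (fun e => valid_email e && pvMatch parts e) = none := by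
      rw [List.find?_eq_none]
      intro x hx
      have := (List.find?_eq_none.mp hfv) x hx
      simp only [Bool.and_eq_true, not_and]
      intro h1
      exact absurd h1 (by simpa using this)
    simp [hnil, pickF, hfm, hfv]
  · rw [if_neg hnil, scanA_eq, head_filter_eq_find? _ hnil]
    unfold pickF
    rfl
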